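-- pv_equiv track=rewrite | github.com/chandrasekharreddy-7/python | pra/9.py | dup_mover
-- ===== SOURCE A (Python) =====
-- def dup_mover(string):
--     new_str = ""
--     dup = ""
--     for i in string:
--         if i not in new_str:
--             new_str += i
--         else:
--             dup += i
--     c_str = new_str + '_' + dup
--     return c_str
-- ===== SOURCE B (Python) =====
-- def dup_mover(string):
--     # Build the first-occurrence characters up front, then strip each one's
--     # first occurrence from a copy of the input; what is left are the duplicates.
--     unique = ''.join(dict.fromkeys(string))
--     remaining = list(string)
--     for ch in unique:
--         remaining.remove(ch)
--     return unique + '_' + ''.join(remaining)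
-- ===== Notes on version B (the rewrite author's own statement) =====
-- stated objective: idiomatic
-- what changed: Replaces A's single classify-while-scanning loop (substring membership test against the growing result) with an ordered dedup via dict.fromkeys followed by a removal pass that strips each unique char's first occurrence, leaving the duplicates.
import Mathlib
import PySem

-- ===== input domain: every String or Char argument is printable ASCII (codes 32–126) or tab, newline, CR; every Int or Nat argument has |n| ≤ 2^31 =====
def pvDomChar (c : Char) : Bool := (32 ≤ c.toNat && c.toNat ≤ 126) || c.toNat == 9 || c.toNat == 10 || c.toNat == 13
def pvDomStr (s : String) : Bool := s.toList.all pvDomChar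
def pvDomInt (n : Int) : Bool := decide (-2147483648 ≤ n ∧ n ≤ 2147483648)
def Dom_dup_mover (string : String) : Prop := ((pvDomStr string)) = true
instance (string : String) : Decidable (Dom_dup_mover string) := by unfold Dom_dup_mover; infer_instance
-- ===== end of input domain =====

-- B builds the first-occurrence chars with an ordered dedup, then removes each one's
-- first occurrence from a copy of the input, instead of A's classify-while-scanning loop
-- (objective: idiomatic; same cost).

-- ===== PORT A =====
-- Python's 'i not in new_str' is a substring test; for the single character i it is
-- exactly character membership, ported as such.
def dup_mover (string : String) : String :=
  let p := string.toList.foldl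
    (fun (st : List Char × List Char) i =>
      if i ∉ st.1 then (st.1 ++ [i], st.2) else (st.1, st.2 ++ [i]))
    ([], [])
  String.ofList (p.1 ++ '_' :: p.2)

-- ===== PORT B =====
-- ''.join(dict.fromkeys(string)) is PySem.List.dedup; remaining.remove(ch) is
-- PySem.List.remove? — ch is a first-occurrence char of string so it is never none
-- (Python never raises ValueError here) and the .getD default is never used.
def dup_mover_alt (string : String) : String :=
  let unique := PySem.List.dedup string.toList
  let remaining := unique.foldl
    (fun rem ch => (PySem.List.remove? rem ch).getD rem) string.toList
  String.ofList (unique ++ '_' :: remaining)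

-- ===== PRECONDITION & SPEC =====
def Spec_dup_mover (string : String) (out : String) : Prop := out = dup_mover_alt string
instance (string : String) (out : String) : Decidable (Spec_dup_mover string out) := by unfold Spec_dup_mover; infer_instance

-- ===== CLAIM (what is proved, stated in full; the proofs are below) =====
def Claim_equal_dup_mover : Prop := ∀ (string : String), Dom_dup_mover string → Spec_dup_mover string (dup_mover string)

-- ===== LEMMAS AND PROOFS =====

-- Spec helpers: first-occurrence chars / duplicate chars of s given already-seen chars.
def uAux : List Char → List Char → List Char
  | _, [] => []
  | seen, x :: xs => if x ∈ seen then uAux seen xs else x :: uAux (seen ++ [x]) xs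

def dAux : List Char → List Char → List Char
  | _, [] => []
  | seen, x :: xs => if x ∈ seen then x :: dAux seen xs else dAux (seen ++ [x]) xs

theorem mem_uAux_not_seen : ∀ (s seen : List Char) (c : Char), c ∈ uAux seen s → c ∉ seen := by
  intro s
  induction s with
  | nil => intro seen c h; simp [uAux] at h
  | cons x xs ih =>
    intro seen c h
    by_cases hx : x ∈ seen
    · simp [uAux, hx] at h; exact ih seen c h
    · simp [uAux, hx] at h
      rcases h with h | h
      · subst h; exact hx
      · intro hc; exact (ih (seen ++ [x]) c h) (List.mem_append.mpr (Or.inl hc))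

theorem foldA_eq : ∀ (s ns d : List Char),
    s.foldl (fun (st : List Char × List Char) i =>
      if i ∉ st.1 then (st.1 ++ [i], st.2) else (st.1, st.2 ++ [i])) (ns, d)
    = (ns ++ uAux ns s, d ++ dAux ns s) := by
  intro s
  induction s with
  | nil => intro ns d; simp [uAux, dAux]
  | cons x xs ih =>
    intro ns d
    rw [List.foldl_cons]
    by_cases hx : x ∈ ns
    · show List.foldl _ (if x ∉ ns then (ns ++ [x], d) else (ns, d ++ [x])) xs = _
      rw [if_neg (not_not.mpr hx), ih]
      simp [uAux, dAux, hx]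
    · show List.foldl _ (if x ∉ ns then (ns ++ [x], d) else (ns, d ++ [x])) xs = _
      rw [if_pos hx, ih]
      simp [uAux, dAux, hx, List.append_assoc]

theorem dedup_eq_uAux : ∀ (s acc : List Char),
    s.foldl PySem.Set.add acc = acc ++ uAux acc s := by
  intro s
  induction s with
  | nil => intro acc; simp [uAux]
  | cons x xs ih =>
    intro acc
    by_cases hx : x ∈ acc
    · simp [List.foldl_cons, PySem.Set.add, hx, uAux, ih]
    · simp [List.foldl_cons, PySem.Set.add, hx, uAux, ih, List.append_assoc]

theorem g_cons_ne (x c : Char) (h : x ≠ c) (l : List Char) :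
    (PySem.List.remove? (x :: l) c).getD (x :: l) = x :: (PySem.List.remove? l c).getD l := by
  rw [PySem.List.remove?_cons_of_ne l h]
  cases PySem.List.remove? l c <;> simp

theorem fold_g_cons (cs : List Char) : ∀ (x : Char) (l : List Char), (∀ c ∈ cs, c ≠ x) →
    cs.foldl (fun rem ch => (PySem.List.remove? rem ch).getD rem) (x :: l)
    = x :: cs.foldl (fun rem ch => (PySem.List.remove? rem ch).getD rem) l := by
  induction cs with
  | nil => intro x l _; simp
  | cons c cs ih =>
    intro x l h
    have hc : c ≠ x := h c (List.mem_cons_self)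
    simp only [List.foldl_cons]
    rw [g_cons_ne x c (Ne.symm hc) l]
    exact ih x _ (fun c' hc' => h c' (List.mem_cons_of_mem _ hc'))

theorem foldB_eq : ∀ (s seen : List Char),
    (uAux seen s).foldl (fun rem ch => (PySem.List.remove? rem ch).getD rem) s
    = dAux seen s := by
  intro s
  induction s with
  | nil => intro seen; simp [uAux, dAux]
  | cons x xs ih =>
    intro seen
    by_cases hx : x ∈ seen
    · simp only [uAux, dAux, hx, if_pos]
      rw [fold_g_cons _ x xs (fun c hc => by
        intro he; subst he; exact (mem_uAux_not_seen xs seen c hc) hx)]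
      rw [ih seen]
    · simp only [uAux, dAux, hx, if_neg, not_false_iff, List.foldl_cons]
      rw [show (PySem.List.remove? (x :: xs) x).getD (x :: xs) = xs by
        simp [PySem.List.remove?_cons_self]]
      exact ih (seen ++ [x])

-- ===== VERDICT (by name: the statement is the Claim_ definition above) =====
theorem dup_mover_spec : Claim_equal_dup_mover := by
  intro s _
  show dup_mover s = dup_mover_alt s
  unfold dup_mover dup_mover_alt
  rw [foldA_eq]
  have hu : PySem.List.dedup s.toList = uAux [] s.toList := by
    simpa [PySem.List.dedup, PySem.Set.ofList, PySem.Set.empty] using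
      dedup_eq_uAux s.toList []
  simp only [hu, List.nil_append, foldB_eq s.toList []]
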